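-- pv_equiv track=rewrite | github.com/AlifSrSE/ProblemSolves | 1428B-beltedRooms.py | solve
-- ===== SOURCE A (Python) =====
-- def solve(s):
--     n = len(s)
--     all_right = all(ch == '-' or ch == '>' for ch in s)
--     all_left = all(ch == '-' or ch == '<' for ch in s)
--
--     if all_right or all_left:
--         return n
--
--     count = 0
--     for i in range(n):
--         if s[i] == '-' or s[(i + 1) % n] == '-':
--             count += 1
--     return count
-- ===== SOURCE B (Python) =====
-- def solve(s):
--     n = len(s)
--     if set(s) <= {'-', '>'} or set(s) <= {'-', '<'}:
--         return n
--     safe = set()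
--     for j, ch in enumerate(s):
--         if ch == '-':
--             safe.add(j)
--             safe.add((j - 1) % n)
--     return len(safe)
-- ===== Notes on version B (the rewrite author's own statement) =====
-- stated objective: faster
-- what changed: Instead of scanning every room and testing the two adjacent belt characters, B scans only the dash positions and marks the (at most) two rooms each dash makes safe in a set, returning the set's size; the guard is expressed as a subset test on set(s).
import Mathlib
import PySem

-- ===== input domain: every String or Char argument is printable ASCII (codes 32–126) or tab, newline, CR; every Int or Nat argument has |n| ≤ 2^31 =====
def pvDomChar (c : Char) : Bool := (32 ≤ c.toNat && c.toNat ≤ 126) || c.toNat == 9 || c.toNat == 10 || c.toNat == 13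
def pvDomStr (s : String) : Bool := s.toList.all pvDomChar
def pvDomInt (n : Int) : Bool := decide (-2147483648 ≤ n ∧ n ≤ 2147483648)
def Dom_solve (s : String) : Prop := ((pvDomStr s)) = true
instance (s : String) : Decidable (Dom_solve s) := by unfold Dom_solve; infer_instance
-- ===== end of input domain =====

-- B replaces A's per-room scan (testing both neighbouring chars) by a scan of the dash
-- positions, marking the two rooms each dash protects in a set (objective: faster, measured
-- constant-factor speedup in a timing run).

-- ===== PORT A =====
def solve (s : String) : Int :=
  let cs := s.toList
  let n := cs.length
  let all_right := cs.all (fun ch => ch == '-' || ch == '>')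
  let all_left := cs.all (fun ch => ch == '-' || ch == '<')
  if all_right || all_left then (n : Int)
  else
    (PySem.List.pyRange 0 (n : Int) 1).foldl
      (fun count i =>
        if PySem.List.pyGetD cs i ' ' == '-'
            || PySem.List.pyGetD cs (PySem.Int.mod (i + 1) (n : Int)) ' ' == '-'
        then count + 1 else count) 0

-- ===== PORT B =====
def solve_alt (s : String) : Int :=
  let cs := s.toList
  let n := cs.length
  if PySem.Set.issubset (PySem.Set.ofList cs) ['-', '>']
      || PySem.Set.issubset (PySem.Set.ofList cs) ['-', '<'] then (n : Int)
  else
    let safe : PySem.Set Int :=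
      (PySem.List.enumerate cs).foldl
        (fun (st : PySem.Set Int) p =>
          if p.2 == '-' then
            PySem.Set.add (PySem.Set.add st p.1) (PySem.Int.mod (p.1 - 1) (n : Int))
          else st)
        PySem.Set.empty
    (safe.length : Int)

-- ===== PRECONDITION & SPEC =====
def Spec_solve (s : String) (out : Int) : Prop := out = solve_alt s
instance (s : String) (out : Int) : Decidable (Spec_solve s out) := by unfold Spec_solve; infer_instance

-- ===== CLAIM (what is proved, stated in full; the proofs are below) =====
def Claim_equal_solve : Prop := ∀ (s : String), Dom_solve s → Spec_solve s (solve s)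

-- ===== LEMMAS AND PROOFS =====

lemma pv_guard_eq (cs : List Char) (c1 c2 : Char) :
    PySem.Set.issubset (PySem.Set.ofList cs) [c1, c2] = cs.all (fun ch => ch == c1 || ch == c2) := by
  have h : PySem.Set.issubset (PySem.Set.ofList cs) [c1, c2] = true
      ↔ cs.all (fun ch => ch == c1 || ch == c2) = true := by
    simp [PySem.Set.issubset_iff, PySem.Set.mem_ofList, List.all_eq_true]
  exact Bool.eq_iff_iff.mpr h

lemma pv_foldl_count (cond : Int → Bool) (l : List Int) : ∀ (c : Int),
    l.foldl (fun count i => if cond i then count + 1 else count) c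
      = c + ((l.filter cond).length : Int) := by
  induction l with
  | nil => simp
  | cons x l ih =>
    intro c
    by_cases h : cond x <;> simp [h, ih] <;> try omega

lemma pv_mem_fold (n : Int) (l : List (Int × Char)) : ∀ (st : PySem.Set Int) (y : Int),
    y ∈ l.foldl (fun (st : PySem.Set Int) p =>
        if p.2 == '-' then PySem.Set.add (PySem.Set.add st p.1) (PySem.Int.mod (p.1 - 1) n) else st) st
      ↔ y ∈ st ∨ ∃ p ∈ l, p.2 = '-' ∧ (y = p.1 ∨ y = PySem.Int.mod (p.1 - 1) n) := by
  induction l with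
  | nil => simp
  | cons q l ih =>
    intro st y
    simp only [List.foldl_cons, ih, List.mem_cons]
    by_cases h : q.2 = '-' <;> simp [h, PySem.Set.mem_add, or_assoc]

lemma pv_nodup_fold (n : Int) (l : List (Int × Char)) : ∀ (st : PySem.Set Int), st.Nodup →
    (l.foldl (fun (st : PySem.Set Int) p =>
        if p.2 == '-' then PySem.Set.add (PySem.Set.add st p.1) (PySem.Int.mod (p.1 - 1) n) else st) st).Nodup := by
  induction l with
  | nil => exact fun st h => h
  | cons q l ih =>
    intro st h
    refine ih _ ?_
    dsimp only
    split
    · exact PySem.Set.nodup_add _ _ (PySem.Set.nodup_add _ _ h)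
    · exact h

lemma pv_mod_roundtrip1 (n i : Int) (h0 : 0 ≤ i) (h1 : i < n) :
    PySem.Int.mod (PySem.Int.mod (i + 1) n - 1) n = i := by
  have hn : 0 < n := lt_of_le_of_lt h0 h1
  rw [PySem.Int.mod_eq_emod_of_pos hn, PySem.Int.mod_eq_emod_of_pos hn]
  have h2 : ((i + 1) % n - 1) % n = (i + 1 - 1) % n := by
    conv_rhs => rw [Int.sub_emod]
    rw [Int.sub_emod ((i + 1) % n) 1 n, Int.emod_emod_of_dvd _ dvd_rfl]
  rw [h2, show i + 1 - 1 = i by ring]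
  exact Int.emod_eq_of_lt h0 h1

lemma pv_mod_roundtrip2 (n k : Int) (h0 : 0 ≤ k) (h1 : k < n) :
    PySem.Int.mod (PySem.Int.mod (k - 1) n + 1) n = k := by
  have hn : 0 < n := lt_of_le_of_lt h0 h1
  rw [PySem.Int.mod_eq_emod_of_pos hn, PySem.Int.mod_eq_emod_of_pos hn]
  have h2 : ((k - 1) % n + 1) % n = (k - 1 + 1) % n := by
    conv_rhs => rw [Int.add_emod]
    rw [Int.add_emod ((k - 1) % n) 1 n, Int.emod_emod_of_dvd _ dvd_rfl]
  rw [h2, show k - 1 + 1 = k by ring]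
  exact Int.emod_eq_of_lt h0 h1

lemma pv_count_eq (cs : List Char) (hne : cs ≠ []) :
    (PySem.List.pyRange 0 (cs.length : Int) 1).foldl
      (fun count i => if PySem.List.pyGetD cs i ' ' == '-'
          || PySem.List.pyGetD cs (PySem.Int.mod (i + 1) (cs.length : Int)) ' ' == '-'
        then count + 1 else count) 0
    = (((PySem.List.enumerate cs).foldl
        (fun (st : PySem.Set Int) p => if p.2 == '-' then
          PySem.Set.add (PySem.Set.add st p.1) (PySem.Int.mod (p.1 - 1) (cs.length : Int)) else st)
        PySem.Set.empty).length : Int) := by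
  have hn : (0 : Int) < (cs.length : Int) := by
    have := List.length_pos_of_ne_nil hne
    exact_mod_cast this
  rw [pv_foldl_count]
  have hperm : ((PySem.List.pyRange 0 (cs.length : Int) 1).filter
      (fun i => PySem.List.pyGetD cs i ' ' == '-'
          || PySem.List.pyGetD cs (PySem.Int.mod (i + 1) (cs.length : Int)) ' ' == '-')).Perm
      ((PySem.List.enumerate cs).foldl
        (fun (st : PySem.Set Int) p => if p.2 == '-' then
          PySem.Set.add (PySem.Set.add st p.1) (PySem.Int.mod (p.1 - 1) (cs.length : Int)) else st)
        PySem.Set.empty) := by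
    rw [List.perm_ext_iff_of_nodup ((PySem.List.nodup_pyRange_one 0 (cs.length : Int)).filter _)
      (pv_nodup_fold _ _ PySem.Set.empty (by exact List.nodup_nil))]
    intro y
    rw [List.mem_filter, PySem.List.mem_pyRange_one, pv_mem_fold]
    simp only [PySem.Set.empty, List.not_mem_nil, false_or, Bool.or_eq_true, beq_iff_eq]
    constructor
    · rintro ⟨⟨hy0, hyn⟩, hc⟩
      rcases hc with hl | hr
      · refine ⟨(y, '-'), ?_, rfl, Or.inl rfl⟩
        rw [PySem.List.mem_enumerate_iff]
        refine ⟨y.toNat, by omega, ?_⟩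
        rw [PySem.List.pyGetD_eq_getElem _ _ hy0 hyn] at hl
        simp [hl, hy0]
      · set j : Int := PySem.Int.mod (y + 1) (cs.length : Int) with hj
        have hj0 : 0 ≤ j := PySem.Int.mod_nonneg _ hn
        have hjn : j < (cs.length : Int) := PySem.Int.mod_lt _ hn
        refine ⟨(j, '-'), ?_, rfl, Or.inr ?_⟩
        · rw [PySem.List.mem_enumerate_iff]
          refine ⟨j.toNat, by omega, ?_⟩
          rw [PySem.List.pyGetD_eq_getElem _ _ hj0 hjn] at hr
          simp [hr, hj0]
        · exact (pv_mod_roundtrip1 _ y hy0 hyn).symm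
    · rintro ⟨p, hp, hdash, hy⟩
      rw [PySem.List.mem_enumerate_iff] at hp
      obtain ⟨k, hk, rfl⟩ := hp
      simp only [zero_add] at hdash hy ⊢
      have hk0 : (0 : Int) ≤ (k : Int) := by positivity
      have hkn : (k : Int) < (cs.length : Int) := by exact_mod_cast hk
      rcases hy with rfl | rfl
      · refine ⟨⟨hk0, hkn⟩, Or.inl ?_⟩
        rw [PySem.List.pyGetD_eq_getElem _ _ hk0 hkn]
        simpa using hdash
      · have hm0 : 0 ≤ PySem.Int.mod ((k : Int) - 1) (cs.length : Int) := PySem.Int.mod_nonneg _ hn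
        have hmn : PySem.Int.mod ((k : Int) - 1) (cs.length : Int) < (cs.length : Int) := PySem.Int.mod_lt _ hn
        refine ⟨⟨hm0, hmn⟩, Or.inr ?_⟩
        rw [pv_mod_roundtrip2 _ _ hk0 hkn]
        rw [PySem.List.pyGetD_eq_getElem _ _ hk0 hkn]
        simpa using hdash
  rw [hperm.length_eq]
  ring

-- ===== VERDICT (by name: the statement is the Claim_ definition above) =====
theorem solve_spec : Claim_equal_solve := by
  intro s _
  unfold Spec_solve solve solve_alt
  simp only [pv_guard_eq]
  split_ifs with h
  · rfl
  · have hne : s.toList ≠ [] := by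
      intro hnil
      simp [hnil] at h
    exact pv_count_eq s.toList hne
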